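-- pv_equiv track=rewrite | github.com/damarisarmoa12/Intro | parcialpython.py | tiempo_mas_rapido
-- ===== SOURCE A (Python) =====
-- def tiempo_mas_rapido (tiempo_salas : list[int]) -> int: #buen ejercicio para cuando nos piden señalar algun indice en una posicion
--     mayor_tiempo = 61
--     menor_indice = 0
--
--     for i in range (len(tiempo_salas)):
--         tiempo = tiempo_salas[i]
--         if 1 <= tiempo <= 60 and tiempo < mayor_tiempo:
--            mayor_tiempo = tiempo
--            menor_indice = i #siempre poner asi cuando necesite poner el indice
--     return menor_indice
-- ===== SOURCE B (Python) =====
-- def tiempo_mas_rapido(tiempo_salas):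
--     # filter pass: keep valid times as (value, index) pairs
--     pares = [(t, i) for i, t in enumerate(tiempo_salas) if 1 <= t <= 60]
--     if not pares:
--         return 0
--     # reduce pass: lexicographic min picks smallest time, earliest index on ties
--     return min(pares)[1]
-- ===== Notes on version B (the rewrite author's own statement) =====
-- stated objective: simpler
-- what changed: Replaces A's single accumulator loop (sentinel 61, running best time/index) with a filter pass building (value, index) pairs followed by a tuple-lexicographic min, returning 0 when no valid time exists.
import Mathlib
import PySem

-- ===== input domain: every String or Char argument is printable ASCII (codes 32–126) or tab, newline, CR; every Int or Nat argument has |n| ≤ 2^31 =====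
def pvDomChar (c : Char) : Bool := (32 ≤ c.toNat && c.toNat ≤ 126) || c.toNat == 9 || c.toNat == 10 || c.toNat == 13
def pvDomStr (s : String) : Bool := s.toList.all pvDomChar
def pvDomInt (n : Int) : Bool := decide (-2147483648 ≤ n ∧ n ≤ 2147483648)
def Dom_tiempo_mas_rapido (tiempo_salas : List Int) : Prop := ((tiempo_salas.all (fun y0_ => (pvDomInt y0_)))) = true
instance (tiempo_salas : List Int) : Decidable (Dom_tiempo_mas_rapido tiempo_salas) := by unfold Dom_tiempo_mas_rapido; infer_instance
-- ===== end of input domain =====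

-- B replaces A's sentinel-accumulator loop by a filter pass (valid (value, index) pairs)
-- plus a lexicographic-min reduce; objective: simpler.

-- ===== PORT A =====
def tiempo_mas_rapido (tiempo_salas : List Int) : Int :=
  ((PySem.List.pyRange 0 (tiempo_salas.length : Int) 1).foldl
    (fun (s : Int × Int) i =>
      let tiempo := PySem.List.pyGetD tiempo_salas i 0   -- index always in range, so exact for tiempo_salas[i]
      if 1 ≤ tiempo ∧ tiempo ≤ 60 ∧ tiempo < s.1 then (tiempo, i) else s)
    (61, 0)).2

-- ===== PORT B =====
def tiempo_mas_rapido_alt (tiempo_salas : List Int) : Int :=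
  let pares := ((PySem.List.enumerate tiempo_salas 0).filter
      (fun p => decide (1 ≤ p.2) && decide (p.2 ≤ 60))).map (fun p => (p.2, p.1))
  match PySem.List.min2? pares (fun p => p.1) (fun p => p.2) with
  | none => 0
  | some m => m.2

-- ===== PRECONDITION & SPEC =====
def Spec_tiempo_mas_rapido (tiempo_salas : List Int) (out : Int) : Prop := out = tiempo_mas_rapido_alt tiempo_salas
instance (tiempo_salas : List Int) (out : Int) : Decidable (Spec_tiempo_mas_rapido tiempo_salas out) := by unfold Spec_tiempo_mas_rapido; infer_instance

-- ===== CLAIM (what is proved, stated in full; the proofs are below) =====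
def Claim_equal_tiempo_mas_rapido : Prop := ∀ (tiempo_salas : List Int), Dom_tiempo_mas_rapido tiempo_salas → Spec_tiempo_mas_rapido tiempo_salas (tiempo_mas_rapido tiempo_salas)

-- ===== LEMMAS AND PROOFS =====

-- A's index loop over range(len(ts)) as a fold over enumerate of the remaining suffix.
theorem pv_range_fold_enum {σ : Type} (full : List Int) (g : σ → Int → Int → σ) :
    ∀ (k : Nat) (a : Nat), a + k = full.length → ∀ (init : σ),
      (PySem.List.pyRange (a : Int) (full.length : Int) 1).foldl
        (fun s i => g s i (PySem.List.pyGetD full i 0)) init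
      = (PySem.List.enumerate (full.drop a) (a : Int)).foldl (fun s p => g s p.1 p.2) init := by
  intro k
  induction k with
  | zero =>
      intro a ha init
      have h1 : PySem.List.pyRange (a : Int) (full.length : Int) 1 = [] :=
        PySem.List.pyRange_one_eq_nil (by omega)
      have h2 : full.drop a = [] := List.drop_eq_nil_of_le (by omega)
      simp [h1, h2]
  | succ k ih =>
      intro a ha init
      have hlt : a < full.length := by omega
      have h1 : PySem.List.pyRange (a : Int) (full.length : Int) 1
          = (a : Int) :: PySem.List.pyRange ((a : Int) + 1) (full.length : Int) 1 :=
        PySem.List.pyRange_one_cons (by exact_mod_cast hlt)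
      have h2 : full.drop a = full[a] :: full.drop (a + 1) :=
        List.drop_eq_getElem_cons hlt
      have h3 : PySem.List.pyGetD full (a : Int) 0 = full[a] := by
        simp [PySem.List.pyGetD, PySem.List.pyGet?, PySem.List.pyIdx?, hlt]
      have h4 : ((a : Int) + 1) = ((a + 1 : Nat) : Int) := by push_cast; ring
      rw [h1, h2]
      simp only [List.foldl_cons, PySem.List.enumerate, h3]
      rw [h4, ih (a + 1) (by omega)]

-- step functions, named for the proofs only
def pvStepA (s : Int × Int) (p : Int × Int) : Int × Int :=
  if 1 ≤ p.2 ∧ p.2 ≤ 60 ∧ p.2 < s.1 then (p.2, p.1) else s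

def pvStepB (acc : Option (Int × Int)) (x : Int × Int) : Option (Int × Int) :=
  match acc with
  | none => some x
  | some m => if (decide (x.1 < m.1) || !decide (m.1 < x.1) && decide (x.2 < m.2)) = true then some x else some m

def pvPares (ts : List Int) (a : Int) : List (Int × Int) :=
  ((PySem.List.enumerate ts a).filter (fun p => decide (1 ≤ p.2) && decide (p.2 ≤ 60))).map (fun p => (p.2, p.1))

theorem pvPares_cons (x : Int) (t : List Int) (a : Int) :
    pvPares (x :: t) a =
      (if 1 ≤ x ∧ x ≤ 60 then [(x, a)] else []) ++ pvPares t (a + 1) := by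
  simp only [pvPares, PySem.List.enumerate]
  by_cases h : 1 ≤ x ∧ x ≤ 60
  · simp [h.1, h.2]
  · rw [Decidable.not_and_iff_or_not] at h
    rcases h with h | h <;> simp [h]

-- invariant: once a valid best (m, j) with j below all remaining indices is held,
-- A's strict-< accumulator and B's lexicographic-min fold move in lockstep.
theorem pv_inv (t : List Int) : ∀ (a : Int) (m j : Int), m ≤ 60 → j < a →
    (pvPares t a).foldl pvStepB (some (m, j)) = some ((PySem.List.enumerate t a).foldl pvStepA (m, j)) := by
  induction t with
  | nil => intro a m j _ _; simp [pvPares, PySem.List.enumerate]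
  | cons x t ih =>
      intro a m j hm hj
      rw [pvPares_cons]
      simp only [PySem.List.enumerate, List.foldl_cons]
      by_cases hv : 1 ≤ x ∧ x ≤ 60
      · rw [if_pos hv]
        simp only [List.foldl_append, List.foldl_cons, List.foldl_nil]
        by_cases hx : x < m
        · have hA : pvStepA (m, j) (a, x) = (x, a) := by
            simp [pvStepA, hv.1, hv.2, hx]
          have hB : pvStepB (some (m, j)) (x, a) = some (x, a) := by
            simp [pvStepB, hx]
          rw [hA, hB, ih (a + 1) x a (by omega) (by omega)]
        · have hA : pvStepA (m, j) (a, x) = (m, j) := by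
            simp [pvStepA]; intro _ _; omega
          have hB : pvStepB (some (m, j)) (x, a) = some (m, j) := by
            have : ¬ a < j := by omega
            simp [pvStepB, hx, this]
          rw [hA, hB, ih (a + 1) m j hm (by omega)]
      · rw [if_neg hv]
        simp only [List.nil_append]
        have hA : pvStepA (m, j) (a, x) = (m, j) := by
          simp [pvStepA]; intro h1 h2; exact absurd ⟨h1, h2⟩ hv
        rw [hA, ih (a + 1) m j hm (by omega)]

-- from the initial sentinel state (61, 0): the two computations agree.
theorem pv_main (t : List Int) : ∀ (a : Int),
    ((PySem.List.enumerate t a).foldl pvStepA (61, 0)).2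
    = (match (pvPares t a).foldl pvStepB none with
       | none => 0
       | some m => m.2) := by
  induction t with
  | nil => intro a; simp [pvPares, PySem.List.enumerate]
  | cons x t ih =>
      intro a
      rw [pvPares_cons]
      simp only [PySem.List.enumerate, List.foldl_cons]
      by_cases hv : 1 ≤ x ∧ x ≤ 60
      · have hA : pvStepA (61, 0) (a, x) = (x, a) := by
          simp [pvStepA, hv.1, hv.2]; omega
        rw [if_pos hv]
        simp only [List.foldl_append, List.foldl_cons, List.foldl_nil]
        have hB : pvStepB none (x, a) = some (x, a) := rfl
        rw [hA, hB, pv_inv t (a + 1) x a (by omega) (by omega)]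
      · have hA : pvStepA (61, 0) (a, x) = (61, 0) := by
          simp [pvStepA]; intro h1 h2; exact absurd ⟨h1, h2⟩ hv
        rw [if_neg hv]
        simp only [List.nil_append]
        rw [hA, ih (a + 1)]

theorem pv_final (ts : List Int) : tiempo_mas_rapido ts = tiempo_mas_rapido_alt ts := by
  unfold tiempo_mas_rapido tiempo_mas_rapido_alt
  have hg : (fun (s : Int × Int) (i : Int) =>
      let tiempo := PySem.List.pyGetD ts i 0
      if 1 ≤ tiempo ∧ tiempo ≤ 60 ∧ tiempo < s.1 then (tiempo, i) else s)
      = fun s i => pvStepA s (i, PySem.List.pyGetD ts i 0) := rfl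
  have hr := pv_range_fold_enum ts (fun s i t => pvStepA s (i, t)) ts.length 0 (by omega) ((61 : Int), (0 : Int))
  simp only [Nat.cast_zero, List.drop_zero] at hr
  have heta : (fun (s : Int × Int) (p : Int × Int) => pvStepA s (p.1, p.2)) = pvStepA := rfl
  rw [hg, hr, heta]
  show _ = (match PySem.List.min2? (pvPares ts 0) (fun p => p.1) (fun p => p.2) with
    | none => (0 : Int) | some m => m.2)
  have hm : PySem.List.min2? (pvPares ts 0) (fun p => p.1) (fun p => p.2)
      = (pvPares ts 0).foldl pvStepB none := by
    unfold PySem.List.min2?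
    congr 1
    funext acc x
    cases acc <;> rfl
  rw [hm]
  exact pv_main ts 0

-- ===== VERDICT (by name: the statement is the Claim_ definition above) =====
theorem tiempo_mas_rapido_spec : Claim_equal_tiempo_mas_rapido := by
  intro ts _
  exact pv_final ts
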